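-- pv_equiv track=rewrite | github.com/Kotezko/python_homework | les008/module.py | findPers
-- ===== SOURCE A (Python) =====
-- def findPers(dct, request):
--     res = {}
--     requestWords = request.split()
--     satisfyIndex = [0 for i in range(max(dct.keys()) + 1)] # Список для подсчёта совпадений
--     for i in dct: # Проход по словарю
--         for j in dct[i]: # Проход по элементам
--             if request.lower().count(j.lower()):  # Ищем совпадения по объекту поиска
--                 satisfyIndex[i] += 1  # Считаем количество совпадений в каждом элементе словаря
--     if max(satisfyIndex): # Проверка наличия совпадений
--         if satisfyIndex.count(max(satisfyIndex)) > 1: # Проверка на несколько совпадений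
--             satisfyList = [i for i in range(len(satisfyIndex)) if satisfyIndex[i] == max(satisfyIndex)]
--             for i in satisfyList:
--                 res[i] = dct[i]
--         else: # Единственное совпадение
--             maxIndex = satisfyIndex.index(max(satisfyIndex))
--             res[maxIndex] = dct[maxIndex]
--     else: # Неудачный поиск
--         res[0] = ['Сотрудник не найден']
--     return res
-- ===== SOURCE B (Python) =====
-- def findPers(dct, request):
--     req = request.lower()
--     best = []
--     best_score = 0
--     for k, vals in dct.items():
--         score = 0
--         for j in vals:
--             if j.lower() in req:
--                 score += 1
--         if score > best_score:
--             best = [k]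
--             best_score = score
--         elif score == best_score and score > 0:
--             best.append(k)
--     if best_score > 0:
--         return {k: dct[k] for k in sorted(best)}
--     return {0: ['Сотрудник не найден']}
-- ===== Notes on version B (the rewrite author's own statement) =====
-- stated objective: faster
-- what changed: B replaces A's key-indexed counting array (of size max(keys)+1, rescanned afterwards by max/count/index/filter passes) with a single streaming pass that lowercases the request once and maintains a running best score plus the list of keys attaining it, emitting the winners in sorted key order; no counting array and no post-pass selection scans exist in B.
-- outside the precondition, e.g. on findPers({-1: ['a'], 1: ['b']}, 'a'): A returns {1: ['b']}, B returns {-1: ['a']}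
import Mathlib
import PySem

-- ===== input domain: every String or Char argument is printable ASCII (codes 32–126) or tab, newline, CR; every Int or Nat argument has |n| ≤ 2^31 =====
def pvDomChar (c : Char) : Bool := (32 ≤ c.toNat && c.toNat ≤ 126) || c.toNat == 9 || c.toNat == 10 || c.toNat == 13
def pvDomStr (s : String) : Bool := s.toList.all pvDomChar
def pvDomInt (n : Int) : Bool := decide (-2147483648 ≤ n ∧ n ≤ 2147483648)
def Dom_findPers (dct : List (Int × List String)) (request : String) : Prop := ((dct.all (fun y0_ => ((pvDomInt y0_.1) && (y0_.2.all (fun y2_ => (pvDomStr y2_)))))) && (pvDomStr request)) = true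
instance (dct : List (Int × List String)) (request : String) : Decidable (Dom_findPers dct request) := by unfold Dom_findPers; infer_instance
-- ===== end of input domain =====

-- B replaces A's key-indexed counting array (of size max(keys)+1, then rescanned by
-- max/count/index/filter passes) by a single streaming pass that keeps a running best
-- score and the list of keys attaining it, emitted in sorted key order at the end.

-- ===== PORT A =====
def findPers (dct : List (Int × List String)) (request : String) : List (Int × List String) :=
  let _requestWords := PySem.Str.split₀ request
  let si0 : List Int :=
    List.replicate (((PySem.List.max? (dct.map Prod.fst) (fun k => k)).getD 0 + 1).toNat) 0
  let si := dct.foldl (fun si kv =>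
      kv.2.foldl (fun si j =>
        if PySem.Str.count (PySem.Str.lower request) (PySem.Str.lower j) != 0 then
          PySem.List.pySetD si kv.1 (PySem.List.pyGetD si kv.1 0 + 1)
        else si) si) si0
  let mx := (PySem.List.max? si (fun x => x)).getD 0
  if mx != 0 then
    if PySem.List.count si mx > 1 then
      let satisfyList := (PySem.List.pyRange 0 (PySem.List.len si) 1).filter
        (fun i => PySem.List.pyGetD si i 0 == mx)
      satisfyList.foldl (fun res i =>
        res ++ [(i, (PySem.Dict.get? (PySem.Dict.mk dct) i).getD [])]) []
    else
      let maxIndex : Int := ((PySem.List.index? si mx).getD 0 : Nat)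
      [(maxIndex, (PySem.Dict.get? (PySem.Dict.mk dct) maxIndex).getD [])]
  else [(0, ["Сотрудник не найден"])]

-- ===== PORT B =====
def findPers_alt (dct : List (Int × List String)) (request : String) : List (Int × List String) :=
  let req := PySem.Str.lower request
  let st := dct.foldl (fun (st : List Int × Int) kv =>
      let score := kv.2.foldl (fun s j => if PySem.Str.isIn (PySem.Str.lower j) req then s + 1 else s) (0 : Int)
      if score > st.2 then ([kv.1], score)
      else if score == st.2 && score > 0 then (st.1 ++ [kv.1], st.2)
      else st) ([], 0)
  if st.2 > 0 then
    (PySem.List.sorted st.1 (fun k => k)).map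
      (fun k => (k, (PySem.Dict.get? (PySem.Dict.mk dct) k).getD []))
  else [(0, ["Сотрудник не найден"])]

-- ===== PRECONDITION & SPEC =====
-- Pre_ excludes: the empty dict (A raises ValueError on max(dct.keys())); dicts with a
-- negative key, where A's negative index into satisfyIndex either raises IndexError or
-- silently credits the matches to an unrelated positive slot (wraparound) — a corner no
-- caller of this helper would specify; and duplicate keys (impossible in a Python dict).
def Pre_findPers (dct : List (Int × List String)) (request : String) : Prop :=
  dct ≠ [] ∧ (dct.map Prod.fst).Nodup ∧ ∀ kv ∈ dct, 0 ≤ kv.1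
instance (dct : List (Int × List String)) (request : String) : Decidable (Pre_findPers dct request) := by
  unfold Pre_findPers; infer_instance
def pvWitness_findPers : (List (Int × List String)) × String := ([(1, ["ann"]), (0, ["bob"])], "ann x")

def Spec_findPers (dct : List (Int × List String)) (request : String) (out : List (Int × List String)) : Prop := out = findPers_alt dct request
instance (dct : List (Int × List String)) (request : String) (out : List (Int × List String)) : Decidable (Spec_findPers dct request out) := by unfold Spec_findPers; infer_instance

-- ===== CLAIM (what is proved, stated in full; the proofs are below) =====
def Claim_equal_findPers : Prop := ∀ (dct : List (Int × List String)) (request : String), Dom_findPers dct request → Pre_findPers dct request → Spec_findPers dct request (findPers dct request)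
-- ===== LEMMAS AND PROOFS =====

-- A's per-element test and B's per-element test
def pvTestA (request j : String) : Bool :=
  PySem.Str.count (PySem.Str.lower request) (PySem.Str.lower j) != 0
def pvTestB (request j : String) : Bool :=
  PySem.Str.isIn (PySem.Str.lower j) (PySem.Str.lower request)
-- score of one dict entry (A's test; equal to B's by pvTest_eq)
def pvScA (request : String) (kv : Int × List String) : Int := (kv.2.countP (pvTestA request) : Int)
-- value of A's counting array at slot t
def pvFS (request : String) (dct : List (Int × List String)) (t : Nat) : Int :=
  ((dct.find? (fun kv => kv.1 == (t : Int))).map (pvScA request)).getD 0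
-- B's running maximum score
def pvM (request : String) (dct : List (Int × List String)) : Int :=
  dct.foldl (fun m kv => max m (pvScA request kv)) 0
-- B's streaming step, with the score named
def pvStep (request : String) (st : List Int × Int) (kv : Int × List String) : List Int × Int :=
  let score := pvScA request kv
  if score > st.2 then ([kv.1], score)
  else if score == st.2 && score > 0 then (st.1 ++ [kv.1], st.2)
  else st

lemma pv_countGo_le (sub : List Char) : ∀ (fuel : Nat) (l : List Char) (acc : Nat),
    acc ≤ PySem.Chars.count.go sub fuel l acc := by
  intro fuel
  induction fuel with
  | zero => intro l acc; simp [PySem.Chars.count.go]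
  | succ n ih =>
    intro l acc
    cases l with
    | nil => simp [PySem.Chars.count.go]
    | cons h t =>
      rw [PySem.Chars.count.go]
      split
      · exact le_trans (Nat.le_succ acc) (ih _ _)
      · exact ih _ _

lemma pv_countGo_ne_iff (sub : List Char) (hsub : sub ≠ []) :
    ∀ (fuel : Nat) (l : List Char) (acc : Nat), l.length ≤ fuel →
      (PySem.Chars.count.go sub fuel l acc ≠ acc ↔ sub <:+: l) := by
  intro fuel
  induction fuel with
  | zero =>
    intro l acc hl
    have : l = [] := List.eq_nil_of_length_eq_zero (Nat.le_zero.mp hl)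
    subst this
    simp [PySem.Chars.count.go, List.infix_nil, hsub]
  | succ n ih =>
    intro l acc hl
    cases l with
    | nil => simp [PySem.Chars.count.go, List.infix_nil, hsub]
    | cons hd t =>
      rw [PySem.Chars.count.go]
      split
      · rename_i hpre
        constructor
        · intro _
          exact List.IsPrefix.isInfix (List.isPrefixOf_iff_prefix.mp hpre)
        · intro _
          have h1 : acc + 1 ≤ PySem.Chars.count.go sub n (List.drop sub.length (hd :: t)) (acc + 1) :=
            pv_countGo_le sub n _ _
          omega
      · rename_i hpre
        have ht : t.length ≤ n := by simpa using hl
        rw [ih t acc ht]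
        rw [List.infix_cons_iff]
        constructor
        · intro h; exact Or.inr h
        · rintro (h | h)
          · exact absurd (List.isPrefixOf_iff_prefix.mpr h) (by simpa using hpre)
          · exact h

lemma pv_count_ne_zero_iff (s sub : List Char) :
    PySem.Chars.count s sub ≠ 0 ↔ sub <:+: s := by
  unfold PySem.Chars.count
  by_cases h : sub = []
  · subst h; simp
  · simp only [List.isEmpty_iff, h, if_false]
    exact pv_countGo_ne_iff sub h s.length s 0 le_rfl

lemma pv_chars_count_isIn (s sub : List Char) :
    (PySem.Chars.count s sub != 0) = PySem.Chars.isIn sub s := by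
  rcases hc : PySem.Chars.isIn sub s with _ | _
  · have h0 : PySem.Chars.count s sub = 0 := by
      by_contra h
      exact absurd ((pv_count_ne_zero_iff s sub).mp h)
        ((PySem.Chars.isIn_eq_false_iff sub s).mp hc)
    simp [h0]
  · have h := (pv_count_ne_zero_iff s sub).mpr ((PySem.Chars.isIn_iff_infix sub s).mp hc)
    simp [bne_iff_ne, h]

lemma pvTest_eq2 (request j : String) :
    (PySem.Str.count (PySem.Str.lower request) (PySem.Str.lower j) != 0)
    = PySem.Str.isIn (PySem.Str.lower j) (PySem.Str.lower request) := by
  simp only [PySem.Str.count_eq, PySem.Str.isIn_eq]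
  exact pv_chars_count_isIn _ _

lemma pvTest_eq (request : String) : pvTestA request = pvTestB request := by
  funext j
  exact pvTest_eq2 request j

-- B's inner score loop is countP
lemma pv_score_loop (request : String) (vs : List String) :
    vs.foldl (fun s j => if PySem.Str.isIn (PySem.Str.lower j) (PySem.Str.lower request) then s + 1 else s) (0 : Int)
    = (vs.countP (pvTestA request) : Int) := by
  rw [pvTest_eq]
  have : ∀ (l : List String) (c : Int),
      l.foldl (fun s j => if PySem.Str.isIn (PySem.Str.lower j) (PySem.Str.lower request) then s + 1 else s) c
      = c + (l.countP (pvTestB request) : Int) := by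
    intro l
    induction l with
    | nil => intro c; simp
    | cons j l ih =>
      intro c
      simp only [List.foldl_cons, List.countP_cons]
      by_cases hj : pvTestB request j
      · rw [if_pos (by simpa [pvTestB] using hj)]
        rw [ih]
        simp [hj]
        ring
      · rw [if_neg (by simpa [pvTestB] using hj)]
        rw [ih]
        simp [hj]
  rw [this]
  simp

-- pvM bounds
lemma pvM_bounds (request : String) (dct : List (Int × List String)) :
    0 ≤ pvM request dct ∧ ∀ kv ∈ dct, pvScA request kv ≤ pvM request dct := by
  exact PySem.List.le_foldl_max_int dct (pvScA request) 0

-- the streaming fold computes (keys attaining the max, the max)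
lemma pv_stream (request : String) (dct : List (Int × List String)) :
    dct.foldl (pvStep request) ([], 0)
    = ((if 0 < pvM request dct then
          (dct.filter (fun kv => pvScA request kv == pvM request dct)).map Prod.fst
        else []), pvM request dct) := by
  induction dct using List.reverseRecOn with
  | nil => simp [pvM]
  | append_singleton dct kv ih =>
    have hM' : pvM request (dct ++ [kv]) = max (pvM request dct) (pvScA request kv) := by
      simp [pvM, List.foldl_append]
    obtain ⟨hM0, hMub⟩ := pvM_bounds request dct
    rw [List.foldl_append, List.foldl_cons, List.foldl_nil, ih, hM']
    simp only [pvStep]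
    by_cases hgt : pvScA request kv > pvM request dct
    · rw [if_pos hgt]
      have hmax : max (pvM request dct) (pvScA request kv) = pvScA request kv := by omega
      rw [hmax, if_pos (show (0 : Int) < pvScA request kv by omega)]
      have hfil : dct.filter (fun e => pvScA request e == pvScA request kv) = [] := by
        rw [List.filter_eq_nil_iff]
        intro e he
        have := hMub e he
        simp only [beq_iff_eq]
        omega
      rw [List.filter_append, hfil, List.nil_append]
      simp
    · rw [if_neg hgt]
      have hmax : max (pvM request dct) (pvScA request kv) = pvM request dct := by omega
      rw [hmax]
      by_cases heq : pvScA request kv = pvM request dct ∧ 0 < pvScA request kv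
      · rw [if_pos (by simp only [Bool.and_eq_true, beq_iff_eq, decide_eq_true_eq]; exact ⟨heq.1, heq.2⟩)]
        rw [if_pos (by omega), if_pos (by omega)]
        rw [List.filter_append]
        have hfil : [kv].filter (fun e => pvScA request e == pvM request dct) = [kv] := by
          simp [heq.1]
        rw [hfil]
        simp
      · rw [if_neg (by simp only [Bool.and_eq_true, beq_iff_eq, decide_eq_true_eq]; intro h; exact heq ⟨h.1, h.2⟩)]
        by_cases hp : 0 < pvM request dct
        · rw [if_pos hp, if_pos hp]
          have hne : pvScA request kv ≠ pvM request dct := fun h => heq ⟨h, by omega⟩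
          have hfil : [kv].filter (fun e => pvScA request e == pvM request dct) = [] := by
            simp only [List.filter_cons, List.filter_nil]
            rw [if_neg (by simpa using hne)]
          rw [List.filter_append, hfil, List.append_nil]
        · rw [if_neg hp, if_neg hp]

-- pvM equals the maximum A takes over the per-key scores
lemma pvM_eq_max? (request : String) (dct : List (Int × List String)) (M : Int)
    (hM : PySem.List.max? (dct.map (pvScA request)) (fun x => x) = some M) :
    pvM request dct = M := by
  have hform : pvM request dct = (dct.map (pvScA request)).foldl max 0 := by
    simp [pvM, List.foldl_map]
  have hub : ∀ x ∈ dct.map (pvScA request), x ≤ pvM request dct := by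
    intro x hx
    obtain ⟨kv, hkv, rfl⟩ := List.mem_map.mp hx
    exact (pvM_bounds request dct).2 kv hkv
  have hMmem := PySem.List.max?_mem hM
  have hMle : M ≤ pvM request dct := hub M hMmem
  rcases PySem.List.foldl_max_mem (dct.map (pvScA request)) 0 with h0 | hmem
  · rw [hform] at *
    have : ∀ x ∈ dct.map (pvScA request), x ≤ (0 : Int) := by rw [← h0]; exact hub
    have h1 := this M hMmem
    obtain ⟨kv0, _, hkv0⟩ := List.mem_map.mp hMmem
    have : 0 ≤ M := hkv0 ▸ by simp [pvScA]
    omega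
  · have := PySem.List.max?_isMax hM _ (hform ▸ hmem)
    omega

lemma pv_inner (request : String) (k : Int) (hk : 0 ≤ k) :
    ∀ (vs : List String) (si : List Int), k.toNat < si.length →
      vs.foldl (fun si j =>
          if PySem.Str.count (PySem.Str.lower request) (PySem.Str.lower j) != 0 then
            PySem.List.pySetD si k (PySem.List.pyGetD si k 0 + 1)
          else si) si
      = si.set k.toNat (si.getD k.toNat 0 + (vs.countP (pvTestA request) : Int)) := by
  intro vs
  induction vs with
  | nil =>
    intro si hlen
    simp only [List.foldl_nil, List.countP_nil, Nat.cast_zero, add_zero]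
    rw [List.getD_eq_getElem _ _ hlen]
    exact (List.set_getElem_self hlen).symm
  | cons j vs ih =>
    intro si hlen
    simp only [List.foldl_cons]
    by_cases hj : pvTestA request j
    · rw [show (if PySem.Str.count (PySem.Str.lower request) (PySem.Str.lower j) != 0 then
            PySem.List.pySetD si k (PySem.List.pyGetD si k 0 + 1) else si)
          = PySem.List.pySetD si k (PySem.List.pyGetD si k 0 + 1) from by
        simp only [pvTestA] at hj; exact if_pos hj]
      rw [PySem.List.pySetD_of_nonneg si _ hk,
          PySem.List.pyGetD_eq_getElem si _ hk (by rw [Int.lt_iff_add_one_le]; omega)]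
      have hlen2 : k.toNat < (si.set k.toNat (si[k.toNat] + 1)).length := by simpa using hlen
      rw [ih _ hlen2]
      rw [List.getD_eq_getElem _ _ hlen2, List.getElem_set_self hlen2, List.set_set]
      rw [List.getD_eq_getElem _ _ hlen]
      rw [List.countP_cons_of_pos hj]
      push_cast
      ring_nf
    · rw [show (if PySem.Str.count (PySem.Str.lower request) (PySem.Str.lower j) != 0 then
            PySem.List.pySetD si k (PySem.List.pyGetD si k 0 + 1) else si) = si from by
        simp only [pvTestA] at hj; exact if_neg hj]
      rw [ih _ hlen, List.countP_cons_of_neg hj]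

lemma pvFS_nil (request : String) (t : Nat) : pvFS request [] t = 0 := rfl

lemma pvFS_append_self (request : String) (dct : List (Int × List String))
    (kv : Int × List String) (hnotin : kv.1 ∉ dct.map Prod.fst) (t : Nat) (ht : kv.1 = (t : Int)) :
    pvFS request (dct ++ [kv]) t = pvScA request kv ∧ pvFS request dct t = 0 := by
  have hnone : dct.find? (fun e => e.1 == (t : Int)) = none := by
    rw [List.find?_eq_none]
    intro x hx hp
    have hx1 : kv.1 = x.1 := by rw [ht, (beq_iff_eq.mp hp)]
    exact hnotin (hx1 ▸ List.mem_map_of_mem hx)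
  constructor
  · unfold pvFS
    rw [List.find?_append, hnone]
    simp [List.find?, ht]
  · unfold pvFS; rw [hnone]; rfl

lemma pvFS_append_ne (request : String) (dct : List (Int × List String))
    (kv : Int × List String) (t : Nat) (ht : kv.1 ≠ (t : Int)) :
    pvFS request (dct ++ [kv]) t = pvFS request dct t := by
  unfold pvFS
  rw [List.find?_append]
  have : List.find? (fun e => e.1 == (t : Int)) [kv] = none := by
    simp only [List.find?_singleton]
    simp [ht]
  rw [this]
  cases dct.find? (fun e => e.1 == (t : Int)) <;> rfl

lemma pv_outer (request : String) :
    ∀ (dct : List (Int × List String)), (dct.map Prod.fst).Nodup → (∀ kv ∈ dct, 0 ≤ kv.1) →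
      ∀ (si : List Int), (∀ kv ∈ dct, kv.1.toNat < si.length) →
        dct.foldl (fun si kv =>
            kv.2.foldl (fun si j =>
              if PySem.Str.count (PySem.Str.lower request) (PySem.Str.lower j) != 0 then
                PySem.List.pySetD si kv.1 (PySem.List.pyGetD si kv.1 0 + 1)
              else si) si) si
        = (List.range si.length).map (fun t => si.getD t 0 + pvFS request dct t) := by
  intro dct
  induction dct using List.reverseRecOn with
  | nil =>
    intro _ _ si _
    simp only [List.foldl_nil, pvFS_nil, add_zero]
    apply List.ext_getElem
    · simp
    · intro i h1 h2
      simp only [List.getElem_map, List.getElem_range]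
      rw [List.getD_eq_getElem]
  | append_singleton dct kv ih =>
    intro hnd hpos si hlt
    have hnd' : (dct.map Prod.fst).Nodup ∧ kv.1 ∉ dct.map Prod.fst := by
      rw [List.map_append] at hnd
      rw [List.nodup_append] at hnd
      refine ⟨hnd.1, fun hm => ?_⟩
      exact hnd.2.2 kv.1 hm kv.1 (by simp) rfl
    have hpos' : ∀ e ∈ dct, 0 ≤ e.1 := fun e he => hpos e (by simp [he])
    have hposkv : 0 ≤ kv.1 := hpos kv (by simp)
    have hlt' : ∀ e ∈ dct, e.1.toNat < si.length := fun e he => hlt e (by simp [he])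
    have hltkv : kv.1.toNat < si.length := hlt kv (by simp)
    rw [List.foldl_append]
    simp only [List.foldl_cons, List.foldl_nil]
    rw [ih hnd'.1 hpos' si hlt']
    set prev := (List.range si.length).map (fun t => si.getD t 0 + pvFS request dct t) with hprev
    have hlenprev : prev.length = si.length := by simp [hprev]
    rw [pv_inner request kv.1 hposkv kv.2 prev (by rw [hlenprev]; exact hltkv)]
    apply List.ext_getElem
    · simp only [List.length_set, List.length_map, List.length_range, hlenprev]
    · intro i h1 h2
      simp only [List.getElem_map, List.getElem_range] at h2 ⊢
      have hi : i < si.length := by simpa using h2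
      rw [List.getElem_set]
      by_cases hit : kv.1.toNat = i
      · have htEq : kv.1 = (i : Int) := by omega
        obtain ⟨hful, hzero⟩ := pvFS_append_self request dct kv hnd'.2 i htEq
        rw [if_pos hit, hful]
        rw [List.getD_eq_getElem prev 0 (n := kv.1.toNat) (by rw [hlenprev]; exact hltkv)]
        simp only [hprev, List.getElem_map, List.getElem_range]
        rw [show kv.1.toNat = i from hit, hzero]
        ring_nf
        rfl
      · have htNe : kv.1 ≠ (i : Int) := by omega
        rw [if_neg hit, pvFS_append_ne request dct kv i htNe]
        simp only [hprev, List.getElem_map, List.getElem_range]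

lemma pv_find_mem (dct : List (Int × List String)) (kv : Int × List String)
    (hnd : (dct.map Prod.fst).Nodup) (hm : kv ∈ dct) :
    dct.find? (fun e => e.1 == kv.1) = some kv := by
  induction dct with
  | nil => cases hm
  | cons hd tl ih =>
    rcases List.mem_cons.mp hm with h | h
    · subst h; simp [List.find?]
    · have hkv1 : kv.1 ∈ tl.map Prod.fst := List.mem_map_of_mem h
      rw [List.map_cons, List.nodup_cons] at hnd
      have hne : hd.1 ≠ kv.1 := fun he => hnd.1 (he ▸ hkv1)
      rw [List.find?_cons_of_neg (by simp [hne])]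
      exact ih hnd.2 h

lemma pv_filter_single : ∀ (l : List Int) (v : Int), l.count v = 1 →
    ∃ idx, PySem.List.index? l v = some idx ∧
      (List.range l.length).filter (fun t => l.getD t 0 == v) = [idx] := by
  intro l
  induction l with
  | nil => intro v h; simp [List.count] at h
  | cons a tl ih =>
    intro v hc
    by_cases hav : a = v
    · subst hav
      have h0 : List.count a tl = 0 := by
        rw [List.count_cons_self] at hc; omega
      refine ⟨0, PySem.List.index?_cons_self a tl, ?_⟩
      rw [List.length_cons, List.range_succ_eq_map]
      rw [List.filter_cons]
      simp only [List.getD_cons_zero, beq_self_eq_true, if_pos trivial]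
      rw [List.filter_map]
      have : (List.range tl.length).filter ((fun t => (a :: tl).getD t 0 == a) ∘ (· + 1)) = [] := by
        rw [List.filter_eq_nil_iff]
        intro t ht
        simp only [Function.comp, List.getD_cons_succ]
        have htl : t < tl.length := List.mem_range.mp ht
        rw [List.getD_eq_getElem tl 0 htl]
        have : tl[t] ∈ tl := List.getElem_mem htl
        have hnotin : a ∉ tl := by
          intro hmem; have := List.count_pos_iff.mpr hmem; omega
        simp only [beq_iff_eq]
        intro he; exact hnotin (he ▸ this)
      rw [this]
      simp
    · have hc' : tl.count v = 1 := by
        rw [List.count_cons] at hc; simp [hav] at hc; omega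
      obtain ⟨idx, hidx, hfil⟩ := ih v hc'
      refine ⟨idx + 1, ?_, ?_⟩
      · rw [PySem.List.index?_cons_of_ne tl hav, hidx]; rfl
      · rw [List.length_cons, List.range_succ_eq_map, List.filter_cons]
        simp only [List.getD_cons_zero]
        rw [if_neg (by simp [hav])]
        rw [List.filter_map]
        have : (List.range tl.length).filter ((fun t => (a :: tl).getD t 0 == v) ∘ (· + 1))
            = (List.range tl.length).filter (fun t => tl.getD t 0 == v) := by
          apply List.filter_congr
          intro t ht
          simp [Function.comp]
        rw [this, hfil]
        rfl

lemma pvFS_of_mem (request : String) (dct : List (Int × List String)) (kv : Int × List String)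
    (hnd : (dct.map Prod.fst).Nodup) (hm : kv ∈ dct) (h0 : 0 ≤ kv.1) :
    pvFS request dct kv.1.toNat = pvScA request kv := by
  unfold pvFS
  rw [show ((kv.1.toNat : Nat) : Int) = kv.1 from Int.toNat_of_nonneg h0]
  rw [pv_find_mem dct kv hnd hm]
  rfl

lemma pvFS_spec (request : String) (dct : List (Int × List String)) (t : Nat)
    (h : pvFS request dct t ≠ 0) :
    ∃ kv ∈ dct, kv.1 = (t : Int) ∧ pvScA request kv = pvFS request dct t := by
  unfold pvFS at h ⊢
  cases hf : dct.find? (fun e => e.1 == (t : Int)) with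
  | none => rw [hf] at h; exact absurd rfl h
  | some kv =>
    refine ⟨kv, List.mem_of_find?_eq_some hf, by have := List.find?_some hf; exact beq_iff_eq.mp this, ?_⟩
    rfl

lemma pvScA_nonneg (request : String) (kv : Int × List String) : 0 ≤ pvScA request kv := by
  simp [pvScA]

lemma pv_max_eq (request : String) (dct : List (Int × List String)) (L : Nat)
    (hne : dct ≠ []) (hnd : (dct.map Prod.fst).Nodup)
    (hpos : ∀ kv ∈ dct, 0 ≤ kv.1) (hlt : ∀ kv ∈ dct, kv.1.toNat < L) :
    ∃ M, 0 ≤ M ∧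
      PySem.List.max? (dct.map (pvScA request)) (fun x => x) = some M ∧
      PySem.List.max? ((List.range L).map (fun t => pvFS request dct t)) (fun x => x) = some M := by
  obtain ⟨M, hM⟩ : ∃ M, PySem.List.max? (dct.map (pvScA request)) (fun x => x) = some M := by
    cases h : PySem.List.max? (dct.map (pvScA request)) (fun x => x) with
    | none => exact absurd (List.map_eq_nil_iff.mp ((PySem.List.max?_eq_none_iff _ _).mp h)) hne
    | some M => exact ⟨M, rfl⟩
  obtain ⟨kv0, hkv0, hkv0M⟩ := List.mem_map.mp (PySem.List.max?_mem hM)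
  have hM0 : 0 ≤ M := hkv0M ▸ pvScA_nonneg request kv0
  obtain ⟨M', hM'⟩ : ∃ M',
      PySem.List.max? ((List.range L).map (fun t => pvFS request dct t)) (fun x => x) = some M' := by
    cases h : PySem.List.max? ((List.range L).map (fun t => pvFS request dct t)) (fun x => x) with
    | none =>
      have := (PySem.List.max?_eq_none_iff _ _).mp h
      simp only [List.map_eq_nil_iff, List.range_eq_nil] at this
      exact absurd (this ▸ hlt kv0 hkv0) (by omega)
    | some M' => exact ⟨M', rfl⟩
  have hMle : M ≤ M' := by
    have hmem : M ∈ (List.range L).map (fun t => pvFS request dct t) := by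
      refine List.mem_map.mpr ⟨kv0.1.toNat, List.mem_range.mpr (hlt kv0 hkv0), ?_⟩
      rw [pvFS_of_mem request dct kv0 hnd hkv0 (hpos kv0 hkv0), hkv0M]
    exact PySem.List.max?_isMax hM' M hmem
  have hM'le : M' ≤ M := by
    obtain ⟨t, ht, htM'⟩ := List.mem_map.mp (PySem.List.max?_mem hM')
    by_cases hz : pvFS request dct t = 0
    · rw [← htM', hz]; exact hM0
    · obtain ⟨kv, hkv, _, hsc⟩ := pvFS_spec request dct t hz
      rw [← htM', ← hsc]
      exact PySem.List.max?_isMax hM (pvScA request kv) (List.mem_map_of_mem hkv)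
  have : M' = M := le_antisymm hM'le hMle
  exact ⟨M, hM0, hM, this ▸ hM'⟩

-- B's sorted best list is the ascending list of keys attaining M
lemma pv_sorted_best (request : String) (dct : List (Int × List String)) (L : Nat) (M : Int)
    (hnd : (dct.map Prod.fst).Nodup) (hpos : ∀ kv ∈ dct, 0 ≤ kv.1)
    (hlt : ∀ kv ∈ dct, kv.1.toNat < L) (hMpos : 0 < M) :
    PySem.List.sorted ((dct.filter (fun kv => pvScA request kv == M)).map Prod.fst) (fun k => k)
    = List.map (fun t : Nat => (t : Int)) ((List.range L).filter
        (fun t => pvFS request dct t == M)) := by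
  apply PySem.List.sorted_eq_of_perm_of_pairwise_lt
  · have hndL : ((dct.filter (fun kv => pvScA request kv == M)).map Prod.fst).Nodup := by
      refine List.Nodup.sublist ?_ hnd
      exact List.Sublist.map Prod.fst List.filter_sublist
    have hndR : (List.map (fun t : Nat => (t : Int)) ((List.range L).filter
        (fun t => pvFS request dct t == M))).Nodup := by
      refine List.Nodup.map (fun a b h => by exact_mod_cast h)
        (List.Nodup.filter _ List.nodup_range)
    rw [List.perm_ext_iff_of_nodup hndR hndL]
    intro x
    constructor
    · intro hx
      obtain ⟨t, htf, rfl⟩ := List.mem_map.mp hx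
      obtain ⟨htr, htM⟩ := List.mem_filter.mp htf
      have hFS : pvFS request dct t = M := beq_iff_eq.mp htM
      obtain ⟨kv, hkv, hkv1, hsc⟩ := pvFS_spec request dct t (by omega)
      refine List.mem_map.mpr ⟨kv, List.mem_filter.mpr ⟨hkv, ?_⟩, hkv1⟩
      rw [hsc, hFS]
      exact beq_self_eq_true M
    · intro hx
      obtain ⟨kv, hkvf, rfl⟩ := List.mem_map.mp hx
      obtain ⟨hkv, hscM⟩ := List.mem_filter.mp hkvf
      refine List.mem_map.mpr ⟨kv.1.toNat, List.mem_filter.mpr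
        ⟨List.mem_range.mpr (hlt kv hkv), ?_⟩, Int.toNat_of_nonneg (hpos kv hkv)⟩
      rw [pvFS_of_mem request dct kv hnd hkv (hpos kv hkv)]
      exact hscM
  · refine List.Pairwise.map _ (fun a b h => by exact_mod_cast h)
      (List.Pairwise.filter _ List.pairwise_lt_range)

theorem findPers_spec : Claim_equal_findPers := by
  intro dct request _hdom hpre
  obtain ⟨hne, hnd, hpos⟩ := hpre
  show findPers dct request = findPers_alt dct request
  obtain ⟨k0, hk0⟩ : ∃ k0, PySem.List.max? (dct.map Prod.fst) (fun k => k) = some k0 := by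
    cases h : PySem.List.max? (dct.map Prod.fst) (fun k => k) with
    | none => exact absurd (List.map_eq_nil_iff.mp ((PySem.List.max?_eq_none_iff _ _).mp h)) hne
    | some k0 => exact ⟨k0, rfl⟩
  have hk0max : ∀ kv ∈ dct, kv.1 ≤ k0 :=
    fun kv h => PySem.List.max?_isMax hk0 kv.1 (List.mem_map_of_mem h)
  obtain ⟨kvm, hkvm, hkvm1⟩ := List.mem_map.mp (PySem.List.max?_mem hk0)
  have hk0pos : 0 ≤ k0 := hkvm1 ▸ hpos kvm hkvm
  have hLlt : ∀ kv ∈ dct, kv.1.toNat < (k0 + 1).toNat := by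
    intro kv h; have h1 := hpos kv h; have h2 := hk0max kv h; omega
  obtain ⟨M, hM0, hMvals, hMsi⟩ := pv_max_eq request dct (k0 + 1).toNat hne hnd hpos hLlt
  have hpvM : pvM request dct = M := pvM_eq_max? request dct M hMvals
  simp only [findPers, findPers_alt]
  rw [hk0]
  simp only [Option.getD_some]
  rw [pv_outer request dct hnd hpos (List.replicate (k0 + 1).toNat 0)
    (by simpa using hLlt)]
  simp only [List.length_replicate]
  rw [show (List.range (k0 + 1).toNat).map
        (fun t => (List.replicate (k0 + 1).toNat (0 : Int)).getD t 0 + pvFS request dct t)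
      = (List.range (k0 + 1).toNat).map (fun t => pvFS request dct t) from by
    apply List.map_congr_left
    intro t ht
    rw [List.getD_eq_getElem _ _ (by simpa using List.mem_range.mp ht)]
    simp]
  rw [hMsi]
  simp only [Option.getD_some]
  -- rewrite B's fold to the pvStep fold, then to its closed form
  rw [show (fun (st : List Int × Int) kv =>
        let score := kv.2.foldl (fun s j =>
          if PySem.Str.isIn (PySem.Str.lower j) (PySem.Str.lower request) then s + 1 else s) (0 : Int)
        if score > st.2 then ([kv.1], score)
        else if score == st.2 && score > 0 then (st.1 ++ [kv.1], st.2)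
        else st) = pvStep request from by
    funext st kv
    simp only [pvStep, pvScA, pv_score_loop request kv.2]
    rfl]
  rw [pv_stream request dct, hpvM]
  by_cases hMpos : 0 < M
  · rw [if_pos (by simp only [bne_iff_ne, ne_eq]; omega : (M != 0) = true)]
    rw [if_pos hMpos]
    simp only [hMpos, if_pos]
    set si := (List.range (k0 + 1).toNat).map (fun t => pvFS request dct t) with hsidef
    have hlen : si.length = (k0 + 1).toNat := by simp [hsidef]
    have hgetDsi : ∀ t ∈ List.range (k0 + 1).toNat, si.getD t 0 = pvFS request dct t := by
      intro t ht
      rw [hsidef, PySem.List.getD_map_range _ _ _ _ (List.mem_range.mp ht)]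
    have hfilA : (PySem.List.pyRange 0 (PySem.List.len si) 1).filter
          (fun i => PySem.List.pyGetD si i 0 == M)
        = List.map (fun t : Nat => (t : Int)) ((List.range (k0 + 1).toNat).filter
            (fun t => pvFS request dct t == M)) := by
      rw [PySem.List.len_eq, hlen, PySem.List.pyRange_zero_nat, List.filter_map]
      refine congrArg (List.map (fun t : Nat => (t : Int))) (List.filter_congr ?_)
      intro t ht
      simp only [Function.comp]
      rw [PySem.List.pyGetD_natCast, hgetDsi t ht]
    rw [pv_sorted_best request dct (k0 + 1).toNat M hnd hpos hLlt hMpos]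
    by_cases hcnt : PySem.List.count si M > 1
    · rw [if_pos hcnt, hfilA, PySem.List.foldl_append_singleton_eq_map, List.nil_append, List.map_map]
    · rw [if_neg hcnt]
      have hMmem : M ∈ si := PySem.List.max?_mem hMsi
      have hcount1 : List.count M si = 1 := by
        rw [PySem.List.count_eq] at hcnt
        have := List.count_pos_iff.mpr hMmem
        omega
      obtain ⟨idx, hidx, hfil⟩ := pv_filter_single si M hcount1
      have hfil' : (List.range (k0 + 1).toNat).filter (fun t => pvFS request dct t == M) = [idx] := by
        rw [← hlen, ← hfil]
        symm
        apply List.filter_congr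
        intro t ht
        rw [hgetDsi t (by rwa [hlen] at ht)]
      rw [PySem.List.index?_eq_idxOf?] at hidx
      rw [hfil', PySem.List.index?_eq_idxOf?, hidx]
      rfl
  · have hMz : M = 0 := by omega
    simp [hMz]
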